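-- pv_equiv track=rewrite | github.com/565353780/auto-scan2cad | scene-layout-detect/scene_layout_detect/Method/cluster.py | getClusterIdxList
-- ===== SOURCE A (Python) =====
-- def getClusterIdxList(line_num, cut_idx_list):
--     if cut_idx_list == []:
--         return [0 for _ in range(line_num)]
--
--     cluster_idx_list = []
--
--     current_idx = 0
--     for i in range(line_num):
--         cluster_idx_list.append(current_idx)
--
--         if i == max(cut_idx_list):
--             current_idx = 0
--             continue
--
--         if i in cut_idx_list:
--             current_idx += 1
--     return cluster_idx_list
-- ===== SOURCE B (Python) =====
-- def getClusterIdxList(line_num, cut_idx_list):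
--     if cut_idx_list == []:
--         return [0 for _ in range(line_num)]
--     top = max(cut_idx_list)
--     cuts = set(cut_idx_list)
--     return [sum(1 for c in cuts if 0 <= c < i) if i <= top else 0
--             for i in range(line_num)]
-- ===== Notes on version B (the rewrite author's own statement) =====
-- stated objective: alternative
-- what changed: Replaces A's running cluster counter (which recomputes max() and rescans the list for membership on every iteration) with a precomputed max and distinct-cut set plus a per-index closed form: 0 past the maximum cut, otherwise the count of distinct non-negative cuts below the index.
import Mathlib
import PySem

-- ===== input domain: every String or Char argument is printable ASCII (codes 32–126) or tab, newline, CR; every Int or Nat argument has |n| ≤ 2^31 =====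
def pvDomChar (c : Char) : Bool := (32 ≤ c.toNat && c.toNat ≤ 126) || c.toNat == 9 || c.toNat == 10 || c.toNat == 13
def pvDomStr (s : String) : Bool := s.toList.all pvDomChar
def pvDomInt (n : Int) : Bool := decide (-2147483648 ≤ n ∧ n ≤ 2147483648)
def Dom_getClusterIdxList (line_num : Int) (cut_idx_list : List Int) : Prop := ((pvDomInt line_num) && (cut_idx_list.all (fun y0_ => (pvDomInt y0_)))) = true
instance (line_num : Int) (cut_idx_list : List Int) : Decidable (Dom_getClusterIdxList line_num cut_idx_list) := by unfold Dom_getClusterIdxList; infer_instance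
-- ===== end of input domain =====

-- B replaces A's running accumulator (which also recomputes max() on every iteration)
-- with one precomputed max and distinct-cut set and a per-index closed-form count; objective: alternative.

-- ===== PORT A =====
def getClusterIdxList (line_num : Int) (cut_idx_list : List Int) : List Int :=
  if cut_idx_list == [] then
    (PySem.List.pyRange 0 line_num 1).map (fun _ => 0)
  else
    ((PySem.List.pyRange 0 line_num 1).foldl
      (fun (st : List Int × Int) i =>
        let appended := st.1 ++ [st.2]
        if i == (PySem.List.max? cut_idx_list (fun x => x)).getD 0 then
          (appended, 0)
        else if cut_idx_list.contains i then
          (appended, st.2 + 1)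
        else
          (appended, st.2))
      ([], 0)).1

-- ===== PORT B =====
def getClusterIdxList_alt (line_num : Int) (cut_idx_list : List Int) : List Int :=
  if cut_idx_list == [] then
    (PySem.List.pyRange 0 line_num 1).map (fun _ => 0)
  else
    let top := (PySem.List.max? cut_idx_list (fun x => x)).getD 0
    let cuts := PySem.Set.ofList cut_idx_list
    (PySem.List.pyRange 0 line_num 1).map (fun i =>
      if i ≤ top then
        ((cuts.filter (fun c => decide (0 ≤ c ∧ c < i))).map (fun _ => (1 : Int))).sum
      else 0)

-- ===== PRECONDITION & SPEC =====
def Spec_getClusterIdxList (line_num : Int) (cut_idx_list : List Int) (out : List Int) : Prop := out = getClusterIdxList_alt line_num cut_idx_list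
instance (line_num : Int) (cut_idx_list : List Int) (out : List Int) : Decidable (Spec_getClusterIdxList line_num cut_idx_list out) := by unfold Spec_getClusterIdxList; infer_instance

-- ===== CLAIM (what is proved, stated in full; the proofs are below) =====
def Claim_equal_getClusterIdxList : Prop := ∀ (line_num : Int) (cut_idx_list : List Int), Dom_getClusterIdxList line_num cut_idx_list → Spec_getClusterIdxList line_num cut_idx_list (getClusterIdxList line_num cut_idx_list)

-- ===== LEMMAS AND PROOFS =====

-- the common value at index i: 0 past the maximum cut, otherwise the number of distinct cuts in [0, i)
def pvG (l : List Int) (M i : Int) : Int :=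
  if i ≤ M then ((PySem.Set.ofList l).countP (fun c => decide (0 ≤ c ∧ c < i)) : Int) else 0

theorem pv_sum_ones (xs : List Int) (p : Int → Bool) :
    ((xs.filter p).map (fun _ => (1 : Int))).sum = (xs.countP p : Int) := by
  induction xs with
  | nil => simp
  | cons x t ih =>
    simp only [List.filter_cons, List.countP_cons]
    split <;> simp_all <;> omega

theorem pv_count_step (l : List Int) (a : Int) (h0 : 0 ≤ a) :
    l.countP (fun c => decide (0 ≤ c ∧ c < a + 1)) =
    l.countP (fun c => decide (0 ≤ c ∧ c < a)) + l.count a := by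
  induction l with
  | nil => simp
  | cons x t ih =>
    simp only [List.countP_cons, List.count_cons, ih, decide_eq_true_eq, beq_iff_eq]
    split_ifs <;> omega

theorem pv_loop (l : List Int) (M : Int) (hM : PySem.List.max? l (fun x => x) = some M)
    (b : Int) : ∀ (n : Nat) (a : Int), 0 ≤ a → n = (b - a).toNat → ∀ (acc : List Int),
    ((PySem.List.pyRange a b 1).foldl
      (fun (st : List Int × Int) i =>
        let appended := st.1 ++ [st.2]
        if i == (PySem.List.max? l (fun x => x)).getD 0 then (appended, 0)
        else if l.contains i then (appended, st.2 + 1)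
        else (appended, st.2))
      (acc, pvG l M a)).1 = acc ++ (PySem.List.pyRange a b 1).map (pvG l M) := by
  intro n
  induction n with
  | zero =>
    intro a _ hn acc
    rw [PySem.List.pyRange_one_eq_nil (by omega)]
    simp
  | succ k ih =>
    intro a ha hn acc
    rw [PySem.List.pyRange_one_cons (by omega)]
    simp only [List.foldl_cons, List.map_cons]
    have hstep :
        (if a == (PySem.List.max? l (fun x => x)).getD 0 then ((acc ++ [pvG l M a] : List Int), (0:Int))
         else if l.contains a then (acc ++ [pvG l M a], pvG l M a + 1)
         else (acc ++ [pvG l M a], pvG l M a)) = (acc ++ [pvG l M a], pvG l M (a + 1)) := by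
      have hmem : M ∈ l := PySem.List.max?_mem hM
      have hmax : ∀ y ∈ l, y ≤ M := PySem.List.max?_isMax hM
      have hnd : (PySem.Set.ofList l).Nodup := PySem.Set.nodup_ofList l
      have hmemiff : ∀ x, x ∈ PySem.Set.ofList l ↔ x ∈ l := fun x => PySem.Set.mem_ofList l x
      simp only [hM, Option.getD_some]
      by_cases hA : a = M
      · have hg : pvG l M (a + 1) = 0 := by unfold pvG; rw [if_neg (by omega)]
        rw [hA] at hg
        simp [hA, hg]
      · have hne : (a == M) = false := by simp [hA]
        simp only [hne, Bool.false_eq_true, if_false]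
        by_cases hc : a ∈ l
        · have haM : a < M := lt_of_le_of_ne (hmax a hc) hA
          have hcount : (PySem.Set.ofList l).count a = 1 :=
            List.count_eq_one_of_mem hnd ((hmemiff a).2 hc)
          have hg : pvG l M (a + 1) = pvG l M a + 1 := by
            unfold pvG
            rw [if_pos (by omega), if_pos (by omega),
              pv_count_step _ _ ha, hcount]
            push_cast; ring
          simp [hc, hg]
        · have hcount : (PySem.Set.ofList l).count a = 0 := by
            rw [List.count_eq_zero]
            exact fun h => hc ((hmemiff a).1 h)
          have hg : pvG l M (a + 1) = pvG l M a := by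
            unfold pvG
            by_cases hle : a + 1 ≤ M
            · rw [if_pos hle, if_pos (by omega), pv_count_step _ _ ha, hcount]
              simp
            · have hgt : M < a := by
                rcases lt_or_ge a M with h | h
                · omega
                · exact lt_of_le_of_ne h (fun e => hA e.symm)
              rw [if_neg (by omega), if_neg (by omega)]
          simp [hc, hg]
        
    rw [hstep]
    rw [ih (a + 1) (by omega) (by omega) (acc ++ [pvG l M a])]
    simp

theorem pv_alt_eq (line_num : Int) (l : List Int) (hne : l ≠ []) (M : Int)
    (hM : PySem.List.max? l (fun x => x) = some M) :
    getClusterIdxList_alt line_num l = (PySem.List.pyRange 0 line_num 1).map (pvG l M) := by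
  unfold getClusterIdxList_alt
  rw [if_neg (by simp [hne])]
  simp only [hM, Option.getD_some]
  apply List.map_congr_left
  intro i _
  unfold pvG
  rw [pv_sum_ones]

-- ===== VERDICT (by name: the statement is the Claim_ definition above) =====
theorem getClusterIdxList_spec : Claim_equal_getClusterIdxList := by
  intro line_num l _
  unfold Spec_getClusterIdxList
  by_cases hnil : l = []
  · subst hnil; rfl
  · obtain ⟨M, hM⟩ : ∃ M, PySem.List.max? l (fun x => x) = some M := by
      cases h : PySem.List.max? l (fun x => x) with
      | none => exact absurd ((PySem.List.max?_eq_none_iff l (fun x => x)).1 h) hnil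
      | some m => exact ⟨m, rfl⟩
    rw [pv_alt_eq line_num l hnil M hM]
    unfold getClusterIdxList
    rw [if_neg (by simp [hnil])]
    have h0 : pvG l M 0 = 0 := by
      unfold pvG
      have hc : (PySem.Set.ofList l).countP (fun c => decide (0 ≤ c ∧ c < 0)) = 0 :=
        List.countP_eq_zero.2 (by intro c _; simp)
      simp
    have hl := pv_loop l M hM line_num (line_num - 0).toNat 0 le_rfl rfl []
    rw [h0] at hl
    simpa using hl
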